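-- pv_equiv track=rewrite | github.com/anonymous123rainy/LiResolver | utils.py | check_text_for_CPS
-- ===== SOURCE A (Python) =====
-- def check_text_for_CPS(sent):
--     '''
--     判断是否存在相关字段
--     :param text:
--     :return:
--     '''
--     ks = [
--         'authored by',
--         'author:',
--         'author=',
--         'copyright:',
--         'copyright (c)',
--         'copyright ©',
--         'copyrighted by',
--         'copyright [',
--         'copyright {',
--         'copyright 20', # 比如：Copyright 2021 Google LLC
--         'copyright (c) 20',  # 比如：Copyright (C) 2018-2022 Rocky Bernstein <rocky@gnu.org>
--     ]
--     for k in ks: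
--         if sent.lower().find(k) > -1:
--             return True
--     return False
-- ===== SOURCE B (Python) =====
-- def check_text_for_CPS(sent):
--     ks = [
--         'authored by',
--         'author:',
--         'author=',
--         'copyright:',
--         'copyright (c)',
--         'copyright ©',
--         'copyrighted by',
--         'copyright [',
--         'copyright {',
--         'copyright 20',
--         'copyright (c) 20',
--     ]
--     low = sent.lower()
--     # single left-to-right pass simulating a multi-pattern NFA: 'active' holds the
--     # remainders of keywords whose prefix matched ending at the current position
--     active = []
--     for c in low:
--         nxt = [r[1:] for r in active if r[0] == c]
--         nxt += [k[1:] for k in ks if k[0] == c]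
--         if '' in nxt:
--             return True
--         active = nxt
--     return False
-- ===== Notes on version B (the rewrite author's own statement) =====
-- stated objective: alternative
-- what changed: A runs up to 11 independent full find() scans of the lowercased text, one per keyword; B makes a single left-to-right pass simulating a multi-pattern NFA: it maintains the set of remainders of keywords currently partially matched, advancing/spawning/killing them at each character and reporting a hit when a remainder empties.
import Mathlib
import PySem

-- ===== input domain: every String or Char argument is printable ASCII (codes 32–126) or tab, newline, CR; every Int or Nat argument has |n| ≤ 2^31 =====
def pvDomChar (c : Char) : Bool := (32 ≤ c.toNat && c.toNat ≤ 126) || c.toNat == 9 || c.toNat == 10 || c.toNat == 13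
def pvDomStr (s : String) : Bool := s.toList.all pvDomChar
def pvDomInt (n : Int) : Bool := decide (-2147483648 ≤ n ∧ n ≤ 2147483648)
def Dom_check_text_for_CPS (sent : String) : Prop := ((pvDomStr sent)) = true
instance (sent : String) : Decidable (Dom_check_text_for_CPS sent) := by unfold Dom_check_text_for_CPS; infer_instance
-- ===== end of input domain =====

-- B replaces A's up-to-11 independent find() scans by a single left-to-right pass that
-- simulates a multi-pattern NFA (set of active keyword remainders), objective: alternative.


-- ===== PORT A =====
def ksA : List String :=
  ["authored by", "author:", "author=", "copyright:", "copyright (c)",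
   "copyright ©", "copyrighted by", "copyright [", "copyright {",
   "copyright 20", "copyright (c) 20"]

-- loop over keywords, each doing a full find on the lowercased text; early return = any
def check_text_for_CPS (sent : String) : Bool :=
  ksA.any (fun k => decide (-1 < PySem.Str.find (PySem.Str.lower sent) k))

-- ===== PORT B =====
def ksB : List String :=
  ["authored by", "author:", "author=", "copyright:", "copyright (c)",
   "copyright ©", "copyrighted by", "copyright [", "copyright {",
   "copyright 20", "copyright (c) 20"]

-- nxt-building comprehension: remainders of l whose first char is c, with it consumed
def pvStep (c : Char) (l : List (List Char)) : List (List Char) :=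
  l.filterMap (fun r => match r with
    | [] => none
    | c' :: t => if c' = c then some t else none)

-- the for-loop over the lowercased text with early return on a completed match
def pvLoop (ks : List (List Char)) : List Char → List (List Char) → Bool
  | [], _ => false
  | c :: rest, active =>
      let nxt := pvStep c active ++ pvStep c ks
      if nxt.contains ([] : List Char) then true else pvLoop ks rest nxt

-- lowercase once; one pass maintaining the set of partially matched keyword remainders
def check_text_for_CPS_alt (sent : String) : Bool :=
  pvLoop (ksB.map String.toList) (PySem.Chars.lower sent.toList) []

-- ===== PRECONDITION & SPEC =====
def Spec_check_text_for_CPS (sent : String) (out : Bool) : Prop := out = check_text_for_CPS_alt sent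
instance (sent : String) (out : Bool) : Decidable (Spec_check_text_for_CPS sent out) := by unfold Spec_check_text_for_CPS; infer_instance

-- ===== CLAIM (what is proved, stated in full; the proofs are below) =====
def Claim_equal_check_text_for_CPS : Prop := ∀ (sent : String), Dom_check_text_for_CPS sent → Spec_check_text_for_CPS sent (check_text_for_CPS sent)

-- ===== LEMMAS AND PROOFS =====

theorem mem_pvStep {c : Char} {t : List Char} {l : List (List Char)} :
    t ∈ pvStep c l ↔ (c :: t) ∈ l := by
  simp only [pvStep, List.mem_filterMap]
  constructor
  · rintro ⟨r, hr, h⟩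
    match r with
    | [] => simp at h
    | c' :: t' =>
      by_cases hc : c' = c
      · simp [hc] at h; subst hc; subst h; exact hr
      · simp [hc] at h
  · intro h
    exact ⟨c :: t, h, by simp⟩

-- loop invariant: pvLoop succeeds iff some active remainder is a prefix of the rest,
-- or some keyword occurs somewhere in the rest
theorem pvLoop_iff (ks : List (List Char)) (hks : ∀ k ∈ ks, k ≠ []) :
    ∀ (cs : List Char) (active : List (List Char)), (∀ r ∈ active, r ≠ []) →
      (pvLoop ks cs active = true ↔
        (∃ r ∈ active, r <+: cs) ∨ (∃ k ∈ ks, k <:+: cs)) := by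
  intro cs
  induction cs with
  | nil =>
    intro active hact
    simp only [pvLoop]
    constructor
    · intro h; simp at h
    · rintro (⟨r, hr, hp⟩ | ⟨k, hk, hi⟩)
      · exact absurd (List.prefix_nil.mp hp) (hact r hr)
      · exact absurd (List.infix_nil.mp hi) (hks k hk)
  | cons c rest ih =>
    intro active hact
    simp only [pvLoop]
    have hmem : ∀ t : List Char, t ∈ pvStep c active ++ pvStep c ks ↔
        (c :: t) ∈ active ∨ (c :: t) ∈ ks := by
      intro t; simp [List.mem_append, mem_pvStep]
    have hrhs : ((∃ r ∈ active, r <+: c :: rest) ∨ (∃ k ∈ ks, k <:+: c :: rest)) ↔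
        ((∃ t ∈ pvStep c active ++ pvStep c ks, t <+: rest) ∨ (∃ k ∈ ks, k <:+: rest)) := by
      constructor
      · rintro (⟨r, hr, hp⟩ | ⟨k, hk, hi⟩)
        · match r with
          | [] => exact absurd rfl (hact [] hr)
          | c' :: t =>
            obtain ⟨hc, ht⟩ := List.cons_prefix_cons.mp hp
            subst hc
            exact Or.inl ⟨t, (hmem t).mpr (Or.inl hr), ht⟩
        · rcases List.infix_cons_iff.mp hi with hp | hi'
          · match k with
            | [] => exact absurd rfl (hks [] hk)
            | c' :: t =>
              obtain ⟨hc, ht⟩ := List.cons_prefix_cons.mp hp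
              subst hc
              exact Or.inl ⟨t, (hmem t).mpr (Or.inr hk), ht⟩
          · exact Or.inr ⟨k, hk, hi'⟩
      · rintro (⟨t, ht, hp⟩ | ⟨k, hk, hi⟩)
        · rcases (hmem t).mp ht with h | h
          · exact Or.inl ⟨c :: t, h, List.cons_prefix_cons.mpr ⟨rfl, hp⟩⟩
          · exact Or.inr ⟨c :: t, h, (List.cons_prefix_cons.mpr ⟨rfl, hp⟩).isInfix⟩
        · exact Or.inr ⟨k, hk, hi.trans (List.suffix_cons c rest).isInfix⟩
    rw [hrhs]
    by_cases hnil : ([] : List Char) ∈ pvStep c active ++ pvStep c ks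
    · simp only [List.contains_eq_mem, decide_eq_true_eq]
      rw [if_pos (by simpa using hnil)]
      simp only [true_iff]
      exact Or.inl ⟨[], hnil, List.nil_prefix⟩
    · simp only [List.contains_eq_mem, decide_eq_true_eq]
      rw [if_neg (by simpa using hnil)]
      rw [ih _ (fun r hr h => hnil (h ▸ hr))]

theorem check_text_for_CPS_spec : Claim_equal_check_text_for_CPS := by
  intro sent _
  unfold Spec_check_text_for_CPS check_text_for_CPS check_text_for_CPS_alt
  have hks : ∀ k ∈ ksB.map String.toList, k ≠ [] := by decide
  rw [Bool.eq_iff_iff]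
  rw [pvLoop_iff _ hks _ [] (by simp)]
  simp only [List.any_eq_true, decide_eq_true_eq, List.mem_map]
  constructor
  · rintro ⟨k, hk, hfind⟩
    refine Or.inr ⟨k.toList, ⟨k, hk, rfl⟩, ?_⟩
    have := (PySem.Str.find_nonneg_iff (PySem.Str.lower sent) k).mp (by omega)
    simpa [PySem.Str.toList_lower] using this
  · rintro (⟨r, hr, -⟩ | ⟨t, ⟨k, hk, rfl⟩, hi⟩)
    · simp at hr
    refine ⟨k, hk, ?_⟩
    have := (PySem.Str.find_nonneg_iff (PySem.Str.lower sent) k).mpr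
      (by simpa [PySem.Str.toList_lower] using hi)
    omega
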